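-- pv_equiv track=rewrite | github.com/shahe-dev/product-page-automation | backend/app/services/data_extractor.py | get_page_context
-- ===== SOURCE A (Python) =====
-- def get_page_context(
--
--     page_text_map: dict[int, str],
--     page_num: int,
--     window: int = 2
-- ) -> str:
--     """
--     Extract text from pages surrounding a specific page.
--
--     Used by floor plan extractor for text cross-referencing.
--
--     Args:
--         page_text_map: Dict mapping page numbers to text.
--         page_num: The target page number (1-indexed).
--         window: Number of pages before and after to include.
--
--     Returns:
--         Combined text from surrounding pages, or empty string if map is empty.
--     """
--     if not page_text_map:
--         return ""
--
--     start_page = max(1, page_num - window)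
--     end_page = min(max(page_text_map.keys()), page_num + window)
--
--     context_pages = range(start_page, end_page + 1)
--     context_text = []
--
--     for p in context_pages:
--         if p in page_text_map:
--             context_text.append(f"--- Page {p} ---")
--             context_text.append(page_text_map[p])
--
--     return "\n\n".join(context_text)
-- ===== SOURCE B (Python) =====
-- def get_page_context(
--
--     page_text_map: dict[int, str],
--     page_num: int,
--     window: int = 2
-- ) -> str:
--     """Concatenate text from pages within `window` of `page_num`.
--
--     Different decomposition: instead of scanning the page-number interval and
--     probing the dict (with max(keys) clamping), sort the dict's items once by
--     page number and make a single pass over them, emitting one combined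
--     header+text block per in-window page.
--     """
--     if not page_text_map:
--         return ""
--
--     lo = max(1, page_num - window)
--     hi = page_num + window
--
--     blocks = [
--         f"--- Page {p} ---\n\n{text}"
--         for p, text in sorted(page_text_map.items(), key=lambda kv: kv[0])
--         if lo <= p <= hi
--     ]
--     return "\n\n".join(blocks)
-- ===== Notes on version B (the rewrite author's own statement) =====
-- stated objective: alternative
-- what changed: B sorts the dict's items by page number and makes one filtered pass over them, emitting a single combined header+text block per kept page, instead of A's scan of range(start,end+1) with dict membership probes, max(keys) clamping and two list appends per page.
import Mathlib
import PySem

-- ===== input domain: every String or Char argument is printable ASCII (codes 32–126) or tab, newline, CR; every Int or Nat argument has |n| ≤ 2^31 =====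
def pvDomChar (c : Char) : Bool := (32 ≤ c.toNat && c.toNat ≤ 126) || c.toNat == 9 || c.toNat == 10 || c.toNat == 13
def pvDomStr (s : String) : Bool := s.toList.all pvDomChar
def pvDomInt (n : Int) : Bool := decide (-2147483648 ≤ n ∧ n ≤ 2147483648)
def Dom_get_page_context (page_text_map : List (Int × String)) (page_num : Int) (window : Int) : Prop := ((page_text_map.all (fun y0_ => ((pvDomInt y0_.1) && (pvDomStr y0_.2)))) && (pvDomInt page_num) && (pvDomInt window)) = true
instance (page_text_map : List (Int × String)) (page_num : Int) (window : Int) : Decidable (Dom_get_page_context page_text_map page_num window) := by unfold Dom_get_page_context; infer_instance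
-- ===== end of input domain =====

-- B sorts the dict's items by page number and makes one filtered pass over them,
-- emitting a single combined header+text block per kept page, instead of A's interval
-- scan with membership probes, max(keys) clamping and two appends per page
-- (objective: alternative decomposition).

-- ===== PORT A =====
def get_page_context (page_text_map : List (Int × String)) (page_num : Int) (window : Int) : String :=
  if page_text_map = [] then ""
  else
    let d := PySem.Dict.mk page_text_map
    let start_page := max 1 (page_num - window)
    -- max(page_text_map.keys()): keys is nonempty here, so the `.getD 0` default is never used
    let end_page := min ((PySem.List.max? d.keys (fun x => x)).getD 0) (page_num + window)
    let context_text := (PySem.List.pyRange start_page (end_page + 1) 1).foldl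
      (fun acc p =>
        if d.contains p then
          acc ++ ["--- Page " ++ PySem.Int.toStr p ++ " ---", d.getD p ""]
        else acc) []
    PySem.Str.join "\n\n" context_text

-- ===== PORT B =====
def get_page_context_alt (page_text_map : List (Int × String)) (page_num : Int) (window : Int) : String :=
  if page_text_map = [] then ""
  else
    let lo := max 1 (page_num - window)
    let hi := page_num + window
    let sortedItems := PySem.List.sorted (PySem.Dict.mk page_text_map).items (fun kv => kv.1) false
    let blocks := sortedItems.foldl
      (fun acc kv =>
        if decide (lo ≤ kv.1) && decide (kv.1 ≤ hi) then
          acc ++ ["--- Page " ++ PySem.Int.toStr kv.1 ++ " ---" ++ "\n\n" ++ kv.2]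
        else acc) []
    PySem.Str.join "\n\n" blocks

-- ===== PRECONDITION & SPEC =====
-- Pre_ excludes association lists with duplicate keys, which have no Python dict
-- counterpart (a Python dict's keys are always distinct: building the dict keeps the
-- last value, the association-list convention the first), so nothing A returns on is lost.
def Pre_get_page_context (page_text_map : List (Int × String)) (page_num : Int) (window : Int) : Prop :=
  (page_text_map.map Prod.fst).Nodup
instance (page_text_map : List (Int × String)) (page_num : Int) (window : Int) : Decidable (Pre_get_page_context page_text_map page_num window) := by unfold Pre_get_page_context; infer_instance
def pvWitness_get_page_context : (List (Int × String)) × Int × Int := ([(1, "a"), (3, "c")], 2, 1)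
def Spec_get_page_context (page_text_map : List (Int × String)) (page_num : Int) (window : Int) (out : String) : Prop := out = get_page_context_alt page_text_map page_num window
instance (page_text_map : List (Int × String)) (page_num : Int) (window : Int) (out : String) : Decidable (Spec_get_page_context page_text_map page_num window out) := by unfold Spec_get_page_context; infer_instance

-- ===== CLAIM (what is proved, stated in full; the proofs are below) =====
def Claim_equal_get_page_context : Prop := ∀ (page_text_map : List (Int × String)) (page_num : Int) (window : Int), Dom_get_page_context page_text_map page_num window → Pre_get_page_context page_text_map page_num window → Spec_get_page_context page_text_map page_num window (get_page_context page_text_map page_num window)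

-- ===== LEMMAS AND PROOFS =====

-- join over a cons-cons list peels one separator off the front
theorem join_cons_cons_str (a b : String) (l : List String) :
    PySem.Str.join "\n\n" (a :: b :: l) = a ++ "\n\n" ++ PySem.Str.join "\n\n" (b :: l) := by
  simp [PySem.Str.join, PySem.Chars.join_cons_cons]
  rw [show ('\n' :: '\n' :: PySem.Chars.join ['\n','\n'] (b.toList :: l.map String.toList))
        = ['\n','\n'] ++ PySem.Chars.join ['\n','\n'] (b.toList :: l.map String.toList) from rfl]
  rw [String.ofList_append, String.append_assoc]

-- a head that already carries a trailing separator absorbs it into the join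
theorem join_absorb (a b : String) (l : List String) :
    PySem.Str.join "\n\n" ((a ++ "\n\n" ++ b) :: l) = a ++ "\n\n" ++ PySem.Str.join "\n\n" (b :: l) := by
  cases l with
  | nil =>
    simp only [PySem.Str.join, PySem.Chars.join_singleton, List.map_cons, List.map_nil]
    rw [String.ofList_toList, String.ofList_toList]
  | cons c t =>
    rw [join_cons_cons_str (a ++ "\n\n" ++ b) c t, join_cons_cons_str b c t]
    simp [String.append_assoc]

-- a tail of one-block-per-page strings joins like the header/text pairs flattened
theorem join_map_aux (t : List (Int × String)) : ∀ (s : String),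
    PySem.Str.join "\n\n" (s :: t.map (fun kv => "--- Page " ++ PySem.Int.toStr kv.1 ++ " ---" ++ "\n\n" ++ kv.2))
    = PySem.Str.join "\n\n" (s :: t.flatMap (fun kv => ["--- Page " ++ PySem.Int.toStr kv.1 ++ " ---", kv.2])) := by
  induction t with
  | nil => intro s; rfl
  | cons kv t ih =>
    intro s
    simp only [List.map_cons, List.flatMap_cons, List.cons_append, List.nil_append]
    rw [join_cons_cons_str s ("--- Page " ++ PySem.Int.toStr kv.1 ++ " ---" ++ "\n\n" ++ kv.2),
        join_absorb ("--- Page " ++ PySem.Int.toStr kv.1 ++ " ---") kv.2,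
        join_cons_cons_str s ("--- Page " ++ PySem.Int.toStr kv.1 ++ " ---"),
        join_cons_cons_str ("--- Page " ++ PySem.Int.toStr kv.1 ++ " ---") kv.2, ih kv.2]

-- B's joined block list is the join of A-style header/text pairs
theorem join_map_block (l : List (Int × String)) :
    PySem.Str.join "\n\n" (l.map (fun kv => "--- Page " ++ PySem.Int.toStr kv.1 ++ " ---" ++ "\n\n" ++ kv.2))
    = PySem.Str.join "\n\n" (l.flatMap (fun kv => ["--- Page " ++ PySem.Int.toStr kv.1 ++ " ---", kv.2])) := by
  cases l with
  | nil => rfl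
  | cons kv t =>
    simp only [List.map_cons, List.flatMap_cons, List.cons_append, List.nil_append]
    rw [join_absorb ("--- Page " ++ PySem.Int.toStr kv.1 ++ " ---") kv.2,
        join_cons_cons_str ("--- Page " ++ PySem.Int.toStr kv.1 ++ " ---") kv.2, join_map_aux t kv.2]

-- the kept, key-sorted items are exactly A's filtered interval scan, paired with their texts
theorem kept_items_eq (page_text_map : List (Int × String)) (page_num window : Int)
    (hne : page_text_map ≠ [])
    (hnd : (page_text_map.map Prod.fst).Nodup) :
    ((PySem.List.sorted (PySem.Dict.mk page_text_map).items (fun kv => kv.1) false).filter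
      (fun kv => decide (max 1 (page_num - window) ≤ kv.1) && decide (kv.1 ≤ page_num + window)))
    = ((PySem.List.pyRange (max 1 (page_num - window))
          (min ((PySem.List.max? (PySem.Dict.mk page_text_map).keys (fun x => x)).getD 0) (page_num + window) + 1) 1).filter
        (fun p => (PySem.Dict.mk page_text_map).contains p)).map
          (fun p => (p, (PySem.Dict.mk page_text_map).getD p "")) := by
  have hkeys : (PySem.Dict.mk page_text_map).keys = page_text_map.map Prod.fst := by
    simp [PySem.Dict.keys]
  have hknd : (PySem.Dict.mk page_text_map).keys.Nodup := hkeys ▸ hnd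
  have hkne : (PySem.Dict.mk page_text_map).keys ≠ [] := by simp [hkeys, hne]
  obtain ⟨mx, hmx⟩ : ∃ mx, PySem.List.max? (PySem.Dict.mk page_text_map).keys (fun x => x) = some mx := by
    cases h : PySem.List.max? (PySem.Dict.mk page_text_map).keys (fun x => x) with
    | none => exact absurd ((PySem.List.max?_eq_none_iff _ _).mp h) hkne
    | some mx => exact ⟨mx, rfl⟩
  have hmax : ∀ p ∈ (PySem.Dict.mk page_text_map).keys, p ≤ mx :=
    fun p hp => PySem.List.max?_isMax hmx p hp
  rw [hmx]
  -- name the sorted items: strictly key-increasing rearrangement of items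
  have hitems : (PySem.Dict.mk page_text_map).items
      = (PySem.Dict.mk page_text_map).keys.map (fun k => (k, (PySem.Dict.mk page_text_map).getD k "")) :=
    PySem.Dict.items_eq_map_keys _ hknd ""
  have hsk : PySem.List.sorted (PySem.Dict.mk page_text_map).items (fun kv => kv.1) false
      = (PySem.List.sorted (PySem.Dict.mk page_text_map).keys (fun x => x) false).map
          (fun k => (k, (PySem.Dict.mk page_text_map).getD k "")) := by
    apply PySem.List.sorted_eq_of_perm_of_pairwise_lt
    · rw [hitems]
      exact ((PySem.List.sorted_perm _ _ _).map _)
    · rw [List.pairwise_map]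
      have h1 := PySem.List.sorted_pairwise (xs := (PySem.Dict.mk page_text_map).keys) (key := fun x => x) (κ := Int)
      have h2 : (PySem.List.sorted (PySem.Dict.mk page_text_map).keys (fun x => x) false).Nodup :=
        (PySem.List.sorted_perm _ _ _).nodup_iff.mpr hknd
      exact (h1.and h2).imp (fun h => lt_of_le_of_ne h.1 h.2)
  rw [hsk, List.filter_map]
  congr 1
  -- filtering the sorted keys to the window IS the filtered interval scan
  apply Eq.symm
  apply PySem.List.eq_of_perm_of_pairwise_le_of_injective (key := fun x : Int => x) (fun _ _ h => h)
  · apply List.perm_of_nodup_nodup_toFinset_eq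
    · exact List.Pairwise.imp ne_of_lt ((PySem.List.pairwise_lt_pyRange_one _ _).filter _)
    · exact ((PySem.List.sorted_perm _ _ _).nodup_iff.mpr hknd).filter _
    · ext p
      simp only [List.mem_toFinset, List.mem_filter, PySem.List.mem_pyRange_one,
        PySem.Dict.contains_iff_mem_keys, PySem.List.mem_sorted, Function.comp,
        Option.getD_some, decide_eq_true_eq, Bool.and_eq_true]
      constructor
      · rintro ⟨⟨h1, h2⟩, h3⟩
        exact ⟨h3, h1, by omega⟩
      · rintro ⟨h3, h1, h2⟩
        have := hmax p h3
        exact ⟨⟨h1, by omega⟩, h3⟩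
  · exact ((PySem.List.pairwise_lt_pyRange_one _ _).filter _).imp le_of_lt
  · exact (PySem.List.sorted_pairwise _ _).filter _

-- ===== VERDICT (by name: the statement is the Claim_ definition above) =====
theorem get_page_context_spec : Claim_equal_get_page_context := by
  intro m pn w _ hpre
  unfold Spec_get_page_context get_page_context get_page_context_alt
  by_cases hne : m = []
  · simp [hne]
  · simp only [if_neg hne]
    rw [PySem.List.foldl_if_eq_foldl_filter, PySem.List.foldl_append_eq_flatMap,
        PySem.List.foldl_append_if (p := fun kv : Int × String =>
          decide (max 1 (pn - w) ≤ kv.1) && decide (kv.1 ≤ pn + w)),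
        List.nil_append, List.nil_append, join_map_block, kept_items_eq m pn w hne hpre, List.flatMap_map]
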